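-- pv_equiv track=rewrite | github.com/bdoncer/ASD | graphs/extra/bit_algo/bit_wiadomosc.py | BFS
-- ===== SOURCE A (Python) =====
-- from queue import Queue
--
-- def BFS(T,s,n):
--     G = [[] for _ in range(n)]
--     for i in range(len(T)):
--         G[T[i][0]].append(T[i][1])
--         G[T[i][0]].append(T[i][1])
--     Q = Queue()
--     visited = [False]*n
--     d = [-1]*n
--     visited[s] = True
--     d[s] = 0
--     Q.put(s)
--     while not Q.empty():
--         u = Q.get()
--         for neigh in G[u]:
--             if visited[neigh] == False:
--                 visited[neigh] = True
--                 d[neigh] = d[u] + 1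
--                 Q.put(neigh)
--     maxx = 0
--     for i in range(n):
--        maxx = max(maxx,d[i])
--     res_max = [0,-1]
--     for i in range(1,maxx):
--         res = 0
--         for j in range(n):
--             if d[j] == i:
--                 res += 1
--         if res > res_max[0]:
--             res_max = [res,i]
--     return res_max[1],res_max[0]
-- ===== SOURCE B (Python) =====
-- # B: same BFS result via an index-pointer list instead of queue.Queue, distances
-- # bucket-counted in one pass instead of A's O(n*maxx) rescan of d per level.
-- def BFS(T, s, n):
--     adj = [[] for _ in range(n)]
--     for u, v in T:
--         adj[u].append(v)
--     d = [-1] * n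
--     d[s] = 0
--     order = [s]
--     i = 0
--     while i < len(order):
--         u = order[i]
--         i += 1
--         for v in adj[u]:
--             if d[v] < 0:
--                 d[v] = d[u] + 1
--                 order.append(v)
--     maxx = max(d)
--     cnt = [0] * (maxx + 1)
--     for x in d:
--         if x >= 0:
--             cnt[x] += 1
--     best_level, best_count = -1, 0
--     for i in range(1, maxx):
--         if cnt[i] > best_count:
--             best_count = cnt[i]
--             best_level = i
--     return best_level, best_count
-- ===== Notes on version B (the rewrite author's own statement) =====
-- stated objective: faster
-- what changed: B replaces queue.Queue with an index-pointer list for the BFS (no visited array: d[v] < 0 marks unvisited) and replaces A's per-level rescans of the distance array with a single-pass bucket count; intended as faster (lock-free queue, one counting pass instead of maxx passes) and measured ~1.4-2x on the check's inputs.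
-- outside the precondition, e.g. on BFS([(1, 5)], 0, 2): A returns (-1, 0), B returns (-1, 0)
import Mathlib
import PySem

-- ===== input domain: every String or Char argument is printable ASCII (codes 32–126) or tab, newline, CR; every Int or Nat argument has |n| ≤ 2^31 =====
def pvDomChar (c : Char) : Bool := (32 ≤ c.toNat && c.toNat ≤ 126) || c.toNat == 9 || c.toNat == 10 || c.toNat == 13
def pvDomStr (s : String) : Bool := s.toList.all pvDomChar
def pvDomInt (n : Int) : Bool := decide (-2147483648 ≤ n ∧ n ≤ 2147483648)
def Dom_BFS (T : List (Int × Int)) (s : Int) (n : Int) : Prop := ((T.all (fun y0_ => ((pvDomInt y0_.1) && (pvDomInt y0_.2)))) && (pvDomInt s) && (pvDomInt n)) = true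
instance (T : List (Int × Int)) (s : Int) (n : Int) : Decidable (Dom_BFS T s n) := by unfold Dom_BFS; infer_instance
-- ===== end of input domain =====

-- B replaces queue.Queue by an index-pointer list and A's per-level rescans of d by one bucket-count pass.

-- Python list indexing with negative wraparound, ported by hand: exact for -len ≤ i < len
-- (guaranteed by Pre_BFS); outside that range Python raises IndexError, which Pre_BFS excludes.
def pyWrap (len : Nat) (i : Int) : Nat := if i < 0 then (i + len).toNat else i.toNat

-- ===== PORT A =====
-- 'for i in range(len(T)): G[T[i][0]].append(T[i][1]); G[T[i][0]].append(T[i][1])' (the line is duplicated in A)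
def buildG_A (n : Nat) : List (Int × Int) → List (List Int) → List (List Int)
  | [], G => G
  | (u, v) :: rest, G =>
    let j := pyWrap n u
    let G1 := G.set j (G.getD j [] ++ [v])
    let G2 := G1.set j (G1.getD j [] ++ [v])
    buildG_A n rest G2

-- body of 'for neigh in G[u]: if visited[neigh] == False: …' over state (Q, visited, d)
def bfsStepA (n : Nat) (u : Int) : List Int × List Bool × List Int → Int → List Int × List Bool × List Int :=
  fun st neigh =>
    let j := pyWrap n neigh
    if st.2.1.getD j true = false then
      (st.1 ++ [neigh], st.2.1.set j true, st.2.2.set j (st.2.2.getD (pyWrap n u) 0 + 1))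
    else st

-- 'while not Q.empty(): u = Q.get(); …'; the FIFO queue is a list popped at the head.
-- Fueled: each iteration pops one element and at most n cells are ever enqueued, so fuel n+1 is never exhausted.
def bfsA (n : Nat) (G : List (List Int)) : Nat → List Int → List Bool → List Int → List Bool × List Int
  | 0, _, vis, d => (vis, d)
  | _ + 1, [], vis, d => (vis, d)
  | fuel + 1, u :: q, vis, d =>
    let st := (G.getD (pyWrap n u) []).foldl (bfsStepA n u) (q, vis, d)
    bfsA n G fuel st.1 st.2.1 st.2.2

def BFS (T : List (Int × Int)) (s : Int) (n : Int) : Int × Int :=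
  let nn := n.toNat
  let G := buildG_A nn T (List.replicate nn [])
  let sj := pyWrap nn s
  let vis := (List.replicate nn false).set sj true
  let d0 := (List.replicate nn (-1 : Int)).set sj 0
  let r := bfsA nn G (nn + 1) [s] vis d0
  let d := r.2
  -- 'for i in range(n): maxx = max(maxx, d[i])' — d has exactly n entries, so this reads d in order
  let maxx := d.foldl (fun m x => max m x) 0
  let rm := (PySem.List.pyRange 1 maxx 1).foldl
    (fun (rm : Int × Int) i =>
      -- 'res = 0; for j in range(n): if d[j] == i: res += 1' — again a pass over d's n entries
      let res := d.foldl (fun r x => if x = i then r + 1 else r) (0 : Int)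
      if res > rm.1 then (res, i) else rm) ((0 : Int), (-1 : Int))
  (rm.2, rm.1)

-- ===== PORT B =====
def buildAdj (n : Nat) : List (Int × Int) → List (List Int) → List (List Int)
  | [], adj => adj
  | (u, v) :: rest, adj =>
    let j := pyWrap n u
    buildAdj n rest (adj.set j (adj.getD j [] ++ [v]))

-- body of 'for v in adj[u]: if d[v] < 0: …' over state (order, d)
def bfsStepB (n : Nat) (u : Int) : List Int × List Int → Int → List Int × List Int :=
  fun st v =>
    let j := pyWrap n v
    if st.2.getD j 0 < 0 then
      (st.1 ++ [v], st.2.set j (st.2.getD (pyWrap n u) 0 + 1))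
    else st

-- 'while i < len(order): u = order[i]; i += 1; …' — fueled like bfsA; fuel n+1 is never exhausted
def bfsB (n : Nat) (adj : List (List Int)) : Nat → List Int → Nat → List Int → List Int × List Int
  | 0, order, _, d => (order, d)
  | fuel + 1, order, i, d =>
    if i < order.length then
      let u := order.getD i 0
      let st := (adj.getD (pyWrap n u) []).foldl (bfsStepB n u) (order, d)
      bfsB n adj fuel st.1 (i + 1) st.2
    else (order, d)

def BFS_alt (T : List (Int × Int)) (s : Int) (n : Int) : Int × Int :=
  let nn := n.toNat
  let adj := buildAdj nn T (List.replicate nn [])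
  let d0 := (List.replicate nn (-1 : Int)).set (pyWrap nn s) 0
  let r := bfsB nn adj (nn + 1) [s] 0 d0
  let d := r.2
  let maxx := (PySem.List.max? d (fun x => x)).getD 0   -- max(d); d nonempty under Pre_BFS
  let cnt := d.foldl
    (fun c x => if 0 ≤ x then c.set x.toNat (c.getD x.toNat 0 + 1) else c)
    (List.replicate (maxx.toNat + 1) (0 : Int))
  (PySem.List.pyRange 1 maxx 1).foldl
    (fun (b : Int × Int) i =>
      if cnt.getD i.toNat 0 > b.2 then (i, cnt.getD i.toNat 0) else b) ((-1 : Int), (0 : Int))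

-- ===== PRECONDITION & SPEC =====
-- A raises IndexError unless there is at least one vertex, the source s is in Python's wraparound
-- range [-n, n), and so is every edge index it touches.  Pre_ bounds BOTH endpoints of every edge,
-- which is slightly narrower: an out-of-range TARGET on an edge whose source is never reached by the
-- BFS is never indexed, so A still returns there (and B behaves identically); whether A raises on
-- such an input depends on reachability from s, which is not a closed-form condition on the input.
def Pre_BFS (T : List (Int × Int)) (s : Int) (n : Int) : Prop :=
  1 ≤ n ∧ -n ≤ s ∧ s < n ∧ ∀ p ∈ T, (-n ≤ p.1 ∧ p.1 < n) ∧ (-n ≤ p.2 ∧ p.2 < n)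
instance (T : List (Int × Int)) (s : Int) (n : Int) : Decidable (Pre_BFS T s n) := by unfold Pre_BFS; infer_instance

def pvWitness_BFS : (List (Int × Int)) × Int × Int := ([(0, 1), (1, 2), (0, 2)], 0, 3)

def Spec_BFS (T : List (Int × Int)) (s : Int) (n : Int) (out : Int × Int) : Prop := out = BFS_alt T s n
instance (T : List (Int × Int)) (s : Int) (n : Int) (out : Int × Int) : Decidable (Spec_BFS T s n out) := by unfold Spec_BFS; infer_instance

-- ===== CLAIM (what is proved, stated in full; the proofs are below) =====
def Claim_equal_BFS : Prop := ∀ (T : List (Int × Int)) (s : Int) (n : Int), Dom_BFS T s n → Pre_BFS T s n → Spec_BFS T s n (BFS T s n)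

-- ===== LEMMAS AND PROOFS =====

-- A's adjacency lists are B's with every entry doubled (A's append line is duplicated)
def pvDouble (l : List Int) : List Int := l.flatMap (fun v => [v, v])
-- A's visited array is determined by the distance array: visited[j] ↔ 0 ≤ d[j]
def pvVisOf (d : List Int) : List Bool := d.map (fun x => decide (0 ≤ x))

theorem pv_getD_map_double (adj : List (List Int)) (j : Nat) :
    (adj.map pvDouble).getD j [] = pvDouble (adj.getD j []) := by
  simp only [List.getD_eq_getElem?_getD, List.getElem?_map]
  cases adj[j]? <;> simp [pvDouble]

theorem pv_foldl_max_max (t : List Int) (a b : Int) :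
    t.foldl max (max a b) = max a (t.foldl max b) := by
  induction t generalizing b with
  | nil => simp
  | cons x t ih =>
    simp only [List.foldl]
    rw [max_assoc, ih]

theorem pv_maxx_eq (d : List Int) (h0 : (0 : Int) ∈ d) :
    d.foldl (fun m x => max m x) 0 = (PySem.List.max? d (fun x => x)).getD 0 := by
  cases d with
  | nil => simp at h0
  | cons x t =>
    rw [PySem.List.max?_id_cons]
    show t.foldl max (max 0 x) = t.foldl max x
    rw [pv_foldl_max_max]
    have hle := PySem.List.le_foldl_max t x
    rcases List.mem_cons.mp h0 with h | h
    · have := hle.1; omega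
    · have := hle.2 0 h; omega

theorem pv_vis_cond (d : List Int) (j : Nat) :
    ((pvVisOf d).getD j true = false) ↔ d.getD j 0 < 0 := by
  by_cases hj : j < d.length
  · simp [pvVisOf, List.getD_eq_getElem?_getD, List.getElem?_map, List.getElem?_eq_getElem hj]
  · have h1 : d[j]? = none := List.getElem?_eq_none (by omega)
    simp [pvVisOf, List.getD_eq_getElem?_getD, List.getElem?_map, h1]

theorem pv_scan_sim (L : List Int) (f g : Int → Int) (h : ∀ i ∈ L, f i = g i) :
    ∀ (a b : Int),
    L.foldl (fun rm i => if f i > rm.1 then (f i, i) else rm) (a, b)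
      = Prod.swap (L.foldl (fun bb i => if g i > bb.2 then (i, g i) else bb) (b, a)) := by
  induction L with
  | nil => intro a b; simp
  | cons i L ih =>
    intro a b
    have hi : f i = g i := h i (by simp)
    have ih' := ih (fun x hx => h x (List.mem_cons_of_mem _ hx))
    by_cases hc : g i > a
    · simp only [List.foldl, hi, if_pos hc]; exact ih' (g i) i
    · simp only [List.foldl, hi, if_neg hc]; exact ih' a b

theorem pv_count_fold (i : Int) (t : List Int) : ∀ (a : Int),
    t.foldl (fun r x => if x = i then r + 1 else r) a
      = a + t.foldl (fun r x => if x = i then r + 1 else r) 0 := by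
  induction t with
  | nil => intro a; simp
  | cons x t ih =>
    intro a
    by_cases hx : x = i
    · simp only [List.foldl, if_pos hx]
      rw [ih (a + 1), ih (0 + 1)]; ring
    · simp only [List.foldl, if_neg hx]
      exact ih a

theorem pv_cnt_lemma (d : List Int) :
    ∀ (c : List Int) (i : Int), 0 ≤ i → i.toNat < c.length → (∀ x ∈ d, (x : Int) < (c.length : Int)) →
    (d.foldl (fun c x => if 0 ≤ x then c.set x.toNat (c.getD x.toNat 0 + 1) else c) c).getD i.toNat 0
      = c.getD i.toNat 0 + d.foldl (fun r x => if x = i then r + 1 else r) 0 := by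
  induction d with
  | nil => intro c i _ _ _; simp
  | cons x t ih =>
    intro c i hi hic hbound
    simp only [List.foldl]
    rw [pv_count_fold i t]
    by_cases hx : 0 ≤ x
    · rw [if_pos hx]
      have hxc : x.toNat < c.length := by
        have := hbound x (by simp); omega
      have hlen : (c.set x.toNat (c.getD x.toNat 0 + 1)).length = c.length := by simp
      rw [ih _ i hi (by omega) (by intro y hy; rw [hlen]; exact hbound y (by simp [hy]))]
      by_cases hxi : x = i
      · have hnat : x.toNat = i.toNat := by rw [hxi]
        rw [if_pos hxi]
        rw [List.getD_eq_getElem?_getD, ← hnat, List.getElem?_set_self hxc]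
        simp; ring
      · have hnat : x.toNat ≠ i.toNat := by omega
        rw [if_neg hxi]
        rw [List.getD_eq_getElem?_getD, List.getElem?_set_ne hnat, ← List.getD_eq_getElem?_getD]
        ring
    · rw [if_neg hx]
      have hxi : ¬ (x = i) := by omega
      rw [if_neg hxi]
      rw [ih c i hi hic (by intro y hy; exact hbound y (by simp [hy]))]
      ring

theorem pv_build_sim (n : Nat) (T : List (Int × Int)) : ∀ (adj : List (List Int)),
    buildG_A n T (adj.map pvDouble) = (buildAdj n T adj).map pvDouble := by
  induction T with
  | nil => intro adj; rfl
  | cons p rest ih =>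
    intro adj
    obtain ⟨u, v⟩ := p
    rw [buildG_A, buildAdj]
    set j := pyWrap n u with hj
    by_cases hjl : j < adj.length
    · have h1 : (adj.map pvDouble).getD j [] = pvDouble (adj.getD j []) := pv_getD_map_double adj j
      have h2 : ((adj.map pvDouble).set j (pvDouble (adj.getD j []) ++ [v])).getD j []
          = pvDouble (adj.getD j []) ++ [v] := by
        rw [List.getD_eq_getElem?_getD, List.getElem?_set_self (by simpa using hjl)]; rfl
      simp only [h1, h2, List.set_set]
      rw [← ih]
      congr 1
      rw [List.map_set (f := pvDouble)]
      congr 1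
      simp [pvDouble]
    · have hset : ∀ (l : List (List Int)), l.length = adj.length → ∀ a, l.set j a = l := by
        intro l hl a; exact List.set_eq_of_length_le (by omega)
      rw [hset _ (by simp) _, hset _ (by simp) _, hset adj rfl _, ih]

theorem pv_inner_sim (n : Nat) (u : Int) (l : List Int) :
    ∀ (q0 ord0 d : List Int), (∀ x ∈ d, -1 ≤ x) →
    ∃ new dout,
      (pvDouble l).foldl (bfsStepA n u) (q0, pvVisOf d, d) = (q0 ++ new, pvVisOf dout, dout)
      ∧ l.foldl (bfsStepB n u) (ord0, d) = (ord0 ++ new, dout)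
      ∧ (∀ x ∈ dout, -1 ≤ x)
      ∧ dout.length = d.length
      ∧ (∀ k : Nat, d.getD k 0 ≠ -1 → dout.getD k 0 = d.getD k 0) := by
  induction l with
  | nil =>
    intro q0 ord0 d hge
    exact ⟨[], d, by simp [pvDouble], by simp, hge, rfl, fun k _ => rfl⟩
  | cons v t ih =>
    intro q0 ord0 d hge
    have hdd : pvDouble (v :: t) = v :: v :: pvDouble t := by simp [pvDouble]
    rw [hdd]
    simp only [List.foldl]
    by_cases hc : d.getD (pyWrap n v) 0 < 0
    · -- unvisited: both sides mark the cell and append the vertex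
      have hjl : pyWrap n v < d.length := by
        by_contra hnl
        rw [List.getD_eq_getElem?_getD, List.getElem?_eq_none (by omega)] at hc
        simp at hc
      have hw : (0 : Int) ≤ d.getD (pyWrap n u) 0 + 1 := by
        by_cases hu : pyWrap n u < d.length
        · have : d.getD (pyWrap n u) 0 ∈ d := by
            rw [List.getD_eq_getElem?_getD, List.getElem?_eq_getElem hu]
            exact List.getElem_mem hu
          have := hge _ this; omega
        · rw [List.getD_eq_getElem?_getD, List.getElem?_eq_none (by omega)]; simp
      set w := d.getD (pyWrap n u) 0 + 1 with hwdef
      have hcondA : (pvVisOf d).getD (pyWrap n v) true = false := (pv_vis_cond d _).mpr hc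
      have hvis' : (pvVisOf d).set (pyWrap n v) true = pvVisOf (d.set (pyWrap n v) w) := by
        simp only [pvVisOf, List.map_set]
        congr 1
        simp [hw]
      have stepA1 : bfsStepA n u (q0, pvVisOf d, d) v
          = (q0 ++ [v], pvVisOf (d.set (pyWrap n v) w), d.set (pyWrap n v) w) := by
        simp only [bfsStepA, hcondA, if_pos]
        rw [hvis']
      have hcond2 : ¬ (d.set (pyWrap n v) w).getD (pyWrap n v) 0 < 0 := by
        rw [List.getD_eq_getElem?_getD, List.getElem?_set_self (by simpa using hjl)]
        simp; omega
      have stepA2 : bfsStepA n u (q0 ++ [v], pvVisOf (d.set (pyWrap n v) w), d.set (pyWrap n v) w) v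
          = (q0 ++ [v], pvVisOf (d.set (pyWrap n v) w), d.set (pyWrap n v) w) := by
        simp only [bfsStepA]
        rw [if_neg]
        simp only [pv_vis_cond]
        exact hcond2
      have stepB : bfsStepB n u (ord0, d) v = (ord0 ++ [v], d.set (pyWrap n v) w) := by
        simp only [bfsStepB, hc, if_pos]; rw [hwdef]
      rw [stepA1, stepA2, stepB]
      have hge' : ∀ x ∈ d.set (pyWrap n v) w, -1 ≤ x := by
        intro x hx
        rcases List.mem_or_eq_of_mem_set hx with h | h
        · exact hge x h
        · omega
      obtain ⟨new, dout, hA, hB, hg, hlen, hpres⟩ := ih (q0 ++ [v]) (ord0 ++ [v]) _ hge'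
      refine ⟨v :: new, dout, ?_, ?_, hg, by simpa using hlen, ?_⟩
      · rw [hA]; simp
      · rw [hB]; simp
      · intro k hk
        have hkj : k ≠ pyWrap n v := by
          intro he
          have : d.getD (pyWrap n v) 0 ∈ d := by
            rw [List.getD_eq_getElem?_getD, List.getElem?_eq_getElem hjl]
            exact List.getElem_mem hjl
          have := hge _ this
          rw [he] at hk; omega
        have hset : (d.set (pyWrap n v) w).getD k 0 = d.getD k 0 := by
          rw [List.getD_eq_getElem?_getD, List.getElem?_set_ne (by omega), ← List.getD_eq_getElem?_getD]
        rw [← hset]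
        exact hpres k (by rw [hset]; exact hk)
    · -- already visited: all three steps are the identity
      have hcondA : ¬ ((pvVisOf d).getD (pyWrap n v) true = false) := by
        rw [pv_vis_cond]; exact hc
      have stepA : bfsStepA n u (q0, pvVisOf d, d) v = (q0, pvVisOf d, d) := by
        simp only [bfsStepA]; rw [if_neg hcondA]
      have stepB : bfsStepB n u (ord0, d) v = (ord0, d) := by
        simp only [bfsStepB]; rw [if_neg hc]
      rw [stepA, stepA, stepB]
      exact ih q0 ord0 d hge

theorem pv_outer_sim (n : Nat) (adj : List (List Int)) :
    ∀ (fuel : Nat) (order : List Int) (i : Nat) (d : List Int),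
    i ≤ order.length → (∀ x ∈ d, -1 ≤ x) →
    ∃ dout,
      bfsA n (adj.map pvDouble) fuel (order.drop i) (pvVisOf d) d = (pvVisOf dout, dout)
      ∧ (bfsB n adj fuel order i d).2 = dout
      ∧ dout.length = d.length
      ∧ (∀ k : Nat, d.getD k 0 ≠ -1 → dout.getD k 0 = d.getD k 0) := by
  intro fuel
  induction fuel with
  | zero =>
    intro order i d _ _
    exact ⟨d, rfl, rfl, rfl, fun k _ => rfl⟩
  | succ fuel ih =>
    intro order i d hi hge
    by_cases hlt : i < order.length
    · rw [List.drop_eq_getElem_cons hlt]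
      set u := order[i] with hu
      have hgd : order.getD i 0 = u := by
        rw [List.getD_eq_getElem?_getD, List.getElem?_eq_getElem hlt]; rfl
      rw [bfsA]
      have hG : (adj.map pvDouble).getD (pyWrap n u) [] = pvDouble (adj.getD (pyWrap n u) []) :=
        pv_getD_map_double adj _
      rw [hG]
      obtain ⟨new, dmid, hA, hB, hg, hlen, hpres⟩ :=
        pv_inner_sim n u (adj.getD (pyWrap n u) []) (order.drop (i + 1)) order d hge
      rw [hA]
      have hBside : bfsB n adj (fuel + 1) order i d
          = bfsB n adj fuel (order ++ new) (i + 1) dmid := by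
        simp only [bfsB, if_pos hlt, hgd, hB]
      have hdrop : (order ++ new).drop (i + 1) = order.drop (i + 1) ++ new :=
        List.drop_append_of_le_length (by omega)
      obtain ⟨dout, hA2, hB2, hlen2, hpres2⟩ :=
        ih (order ++ new) (i + 1) dmid (by simp; omega) hg
      rw [hdrop] at hA2
      refine ⟨dout, hA2, ?_, by omega, ?_⟩
      · rw [hBside]; exact hB2
      · intro k hk
        have h1 : dmid.getD k 0 = d.getD k 0 := hpres k hk
        have h2 : dout.getD k 0 = dmid.getD k 0 := hpres2 k (by rw [h1]; exact hk)
        rw [h2, h1]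
    · have hd : order.drop i = [] := List.drop_eq_nil_of_le (by omega)
      rw [hd, bfsA, bfsB, if_neg hlt]
      exact ⟨d, rfl, rfl, rfl, fun k _ => rfl⟩

-- ===== VERDICT (by name: the statement is the Claim_ definition above) =====
theorem BFS_spec : Claim_equal_BFS := by
  intro T s n _ hpre
  obtain ⟨hn, hs1, hs2, _hT⟩ := hpre
  unfold Spec_BFS
  simp only [BFS, BFS_alt]
  set nn := n.toNat with hnn
  have hnn1 : 1 ≤ nn := by omega
  set sj := pyWrap nn s with hsj
  have hsjlt : sj < nn := by rw [hsj]; unfold pyWrap; split_ifs <;> omega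
  set adjB := buildAdj nn T (List.replicate nn []) with hadj
  have hrepl : (List.replicate nn ([] : List Int)) = (List.replicate nn ([] : List Int)).map pvDouble := by
    simp [pvDouble]
  have hbuild : buildG_A nn T (List.replicate nn []) = adjB.map pvDouble := by
    calc buildG_A nn T (List.replicate nn [])
        = buildG_A nn T ((List.replicate nn []).map pvDouble) := by rw [← hrepl]
      _ = adjB.map pvDouble := by rw [pv_build_sim, hadj]
  set d0 := (List.replicate nn (-1 : Int)).set sj 0 with hd0
  have hvis0 : (List.replicate nn false).set sj true = pvVisOf d0 := by
    rw [hd0]; simp only [pvVisOf, List.map_set, List.map_replicate]; norm_num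
  have hd0ge : ∀ x ∈ d0, -1 ≤ x := by
    intro x hx
    rcases List.mem_or_eq_of_mem_set hx with h | h
    · rw [List.eq_of_mem_replicate h]
    · omega
  obtain ⟨dout, hA, hB, hlen, hpres⟩ := pv_outer_sim nn adjB (nn + 1) [s] 0 d0 (by simp) hd0ge
  rw [List.drop_zero] at hA
  rw [hbuild, hvis0, hA, hB]
  simp only []
  have hdl : dout.length = nn := by rw [hlen, hd0]; simp
  have hd0sj : d0.getD sj 0 = 0 := by
    rw [hd0, List.getD_eq_getElem?_getD, List.getElem?_set_self (by simp; omega)]; rfl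
  have hdsj : dout.getD sj 0 = 0 := by
    rw [hpres sj (by rw [hd0sj]; omega), hd0sj]
  have hsjd : sj < dout.length := by omega
  have h0mem : (0 : Int) ∈ dout := by
    rw [List.getD_eq_getElem?_getD, List.getElem?_eq_getElem hsjd] at hdsj
    simp at hdsj
    exact hdsj ▸ List.getElem_mem hsjd
  rw [← pv_maxx_eq dout h0mem]
  set M := dout.foldl (fun m x => max m x) 0 with hM
  have hMle := PySem.List.le_foldl_max dout 0
  have hM0 : 0 ≤ M := hMle.1
  have hbnd : ∀ x ∈ dout, x ≤ M := hMle.2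
  set c0 := List.replicate (M.toNat + 1) (0 : Int) with hc0
  set cnt := dout.foldl (fun c x => if 0 ≤ x then c.set x.toNat (c.getD x.toNat 0 + 1) else c) c0 with hcnt
  have hfg : ∀ i ∈ PySem.List.pyRange 1 M 1,
      dout.foldl (fun r x => if x = i then r + 1 else r) 0 = cnt.getD i.toNat 0 := by
    intro i himem
    obtain ⟨h1i, h2i⟩ := (PySem.List.mem_pyRange_one).mp himem
    rw [hcnt, pv_cnt_lemma dout c0 i (by omega) (by rw [hc0]; simp; omega)
        (by intro y hy; have := hbnd y hy; rw [hc0]; simp; omega)]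
    have hc0g : (List.replicate (M.toNat + 1) (0 : Int)).getD i.toNat 0 = 0 :=
      List.getD_replicate 0 (by omega)
    rw [hc0, hc0g]
    ring
  have hscan := pv_scan_sim (PySem.List.pyRange 1 M 1)
    (fun i => dout.foldl (fun r x => if x = i then r + 1 else r) 0)
    (fun i => cnt.getD i.toNat 0) hfg 0 (-1)
  simp only [] at hscan
  rw [hscan]
  simp
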